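-- pv_equiv track=rewrite | github.com/Robberduckzilla/tabletopgirl | Python/Dice Puzzle Generator/dice_game.py | get_path_coordinates
-- ===== SOURCE A (Python) =====
-- DIRECTIONS = ('N','S','E','W')
--
-- def get_path_coordinates(start_pos, path):
--     """
--     Converts a start position (2,3), and path NWSSS to a list of squares
--     [(2,3),(2,4),(1,4),(1,3),(1,2),(1,1)]
--     """
--
--     pos = start_pos
--     coords = [start_pos]
--
--     for step in path:
--         i = DIRECTIONS.index(step)
--
--         if i == 0:
--             y=pos[1]+1
--             pos = (pos[0], y)
--         elif i == 1:
--             y = pos[1]-1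
--             pos = (pos[0], y)
--         elif i == 2:
--             x = pos[0]+1
--             pos = (x, pos[1])
--         else:
--             x = pos[0]-1
--             pos = (x, pos[1])
--
--         coords.append(pos)
--
--     return coords
-- ===== SOURCE B (Python) =====
-- DIRECTIONS = ('N','S','E','W')
--
-- def get_path_coordinates(start_pos, path):
--     """
--     Converts a start position (2,3), and path NWSSS to a list of squares
--     [(2,3),(2,4),(1,4),(1,3),(1,2),(1,1)]
--     """
--     # Staged: validate/index every step first (preserving ValueError), then
--     # compute the x-sequence and y-sequence as two independent prefix sums,
--     # and zip them into coordinates.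
--     indices = [DIRECTIONS.index(step) for step in path]
--     x0, y0 = start_pos
--     xs = [x0]
--     for i in indices:
--         xs.append(xs[-1] + (i == 2) - (i == 3))
--     ys = [y0]
--     for i in indices:
--         ys.append(ys[-1] + (i == 0) - (i == 1))
--     return list(zip(xs, ys))
-- ===== Notes on version B (the rewrite author's own statement) =====
-- stated objective: alternative
-- what changed: Instead of one pass maintaining a position pair through an if/elif chain, B indexes all steps up front and then computes the x-coordinates and y-coordinates as two independent prefix-sum sequences, zipping them into the coordinate list.
import Mathlib
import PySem

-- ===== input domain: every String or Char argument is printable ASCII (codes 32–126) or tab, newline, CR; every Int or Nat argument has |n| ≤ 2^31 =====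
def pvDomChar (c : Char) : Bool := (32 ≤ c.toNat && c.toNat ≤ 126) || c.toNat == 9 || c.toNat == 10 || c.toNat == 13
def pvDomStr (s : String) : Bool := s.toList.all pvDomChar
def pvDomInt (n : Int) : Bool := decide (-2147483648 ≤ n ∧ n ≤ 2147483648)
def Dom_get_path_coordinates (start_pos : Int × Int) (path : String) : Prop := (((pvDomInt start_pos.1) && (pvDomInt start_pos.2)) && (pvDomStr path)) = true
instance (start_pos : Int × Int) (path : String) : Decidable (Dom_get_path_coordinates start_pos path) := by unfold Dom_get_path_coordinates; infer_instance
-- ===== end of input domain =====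

-- B replaces the single pass mutating a position pair through an if/elif chain
-- by indexing all steps first, then computing x- and y-coordinates as two
-- independent prefix-sum sequences zipped together; equivalence proved on paths
-- of valid direction characters (elsewhere both Pythons raise ValueError).


-- ===== PORT A =====
-- A's loop: state (pos, coords); DIRECTIONS.index raises ValueError on an
-- invalid char (index? = none, excluded by Pre_; the port leaves state unchanged there).
def pvStepA (st : (Int × Int) × List (Int × Int)) (step : Char) : (Int × Int) × List (Int × Int) :=
  match PySem.List.index? ['N','S','E','W'] step with
  | none => st  -- Python: ValueError, outside Pre_
  | some i =>
    let pos := st.1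
    let pos' :=
      if i = 0 then (pos.1, pos.2 + 1)
      else if i = 1 then (pos.1, pos.2 - 1)
      else if i = 2 then (pos.1 + 1, pos.2)
      else (pos.1 - 1, pos.2)
    (pos', st.2 ++ [pos'])

def get_path_coordinates (start_pos : Int × Int) (path : String) : List (Int × Int) :=
  (path.toList.foldl pvStepA (start_pos, [start_pos])).2

-- ===== PORT B =====
-- B stage 1: indices = [DIRECTIONS.index(step) for step in path]
-- (ValueError on an invalid char, outside Pre_; the port defaults to 0 there).
def pvIndices (path : String) : List Int :=
  path.toList.map (fun step => (PySem.List.index? ['N','S','E','W'] step).getD 0)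

-- B's per-axis increments: (i == 2) - (i == 3) and (i == 0) - (i == 1).
def pvXStep (i : Int) : Int := (if i = 2 then 1 else 0) - (if i = 3 then 1 else 0)
def pvYStep (i : Int) : Int := (if i = 0 then 1 else 0) - (if i = 1 then 1 else 0)

-- B stage 2: a prefix-sum sequence per axis (xs.append(xs[-1] + step)).
def pvAxis (f : Int → Int) (v : Int) : List Int → List Int
  | [] => []
  | i :: is => (v + f i) :: pvAxis f (v + f i) is

-- B stage 3: zip the two axis sequences.
def get_path_coordinates_alt (start_pos : Int × Int) (path : String) : List (Int × Int) :=
  let idxs := pvIndices path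
  (start_pos.1 :: pvAxis pvXStep start_pos.1 idxs).zip
    (start_pos.2 :: pvAxis pvYStep start_pos.2 idxs)

-- ===== PRECONDITION & SPEC =====
-- Pre_ excludes paths containing a character other than N/S/E/W, on which
-- A (and B) raise ValueError from DIRECTIONS.index.
def Pre_get_path_coordinates (start_pos : Int × Int) (path : String) : Prop :=
  (path.toList.all (fun c => c == 'N' || c == 'S' || c == 'E' || c == 'W')) = true
instance (start_pos : Int × Int) (path : String) : Decidable (Pre_get_path_coordinates start_pos path) := by unfold Pre_get_path_coordinates; infer_instance

def pvWitness_get_path_coordinates : (Int × Int) × String := ((0, 0), "N")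

def Spec_get_path_coordinates (start_pos : Int × Int) (path : String) (out : List (Int × Int)) : Prop := out = get_path_coordinates_alt start_pos path
instance (start_pos : Int × Int) (path : String) (out : List (Int × Int)) : Decidable (Spec_get_path_coordinates start_pos path out) := by unfold Spec_get_path_coordinates; infer_instance

-- ===== CLAIM (what is proved, stated in full; the proofs are below) =====
def Claim_equal_get_path_coordinates : Prop := ∀ (start_pos : Int × Int) (path : String), Dom_get_path_coordinates start_pos path → Pre_get_path_coordinates start_pos path → Spec_get_path_coordinates start_pos path (get_path_coordinates start_pos path)

-- ===== LEMMAS AND PROOFS =====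

-- zipping the two axis scans steps in lockstep
theorem pvZipAxis_cons (x y : Int) (i : Int) (is : List Int) :
    (pvAxis pvXStep x (i :: is)).zip (pvAxis pvYStep y (i :: is))
    = (x + pvXStep i, y + pvYStep i)
      :: (pvAxis pvXStep (x + pvXStep i) is).zip (pvAxis pvYStep (y + pvYStep i) is) := by
  simp [pvAxis]

theorem pvIdxN : PySem.List.index? ['N','S','E','W'] 'N' = some 0 := by decide
theorem pvIdxS : PySem.List.index? ['N','S','E','W'] 'S' = some 1 := by decide
theorem pvIdxE : PySem.List.index? ['N','S','E','W'] 'E' = some 2 := by decide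
theorem pvIdxW : PySem.List.index? ['N','S','E','W'] 'W' = some 3 := by decide

theorem pvStepA_N (pos : Int × Int) (acc : List (Int × Int)) :
    pvStepA (pos, acc) 'N' = ((pos.1, pos.2 + 1), acc ++ [(pos.1, pos.2 + 1)]) := rfl
theorem pvStepA_S (pos : Int × Int) (acc : List (Int × Int)) :
    pvStepA (pos, acc) 'S' = ((pos.1, pos.2 - 1), acc ++ [(pos.1, pos.2 - 1)]) := rfl
theorem pvStepA_E (pos : Int × Int) (acc : List (Int × Int)) :
    pvStepA (pos, acc) 'E' = ((pos.1 + 1, pos.2), acc ++ [(pos.1 + 1, pos.2)]) := rfl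
theorem pvStepA_W (pos : Int × Int) (acc : List (Int × Int)) :
    pvStepA (pos, acc) 'W' = ((pos.1 - 1, pos.2), acc ++ [(pos.1 - 1, pos.2)]) := rfl

-- Loop invariant: A's fold over a valid char list appends exactly B's zipped scans.
theorem pvFold_eq_zip (l : List Char) (pos : Int × Int) (acc : List (Int × Int))
    (h : ∀ c ∈ l, c = 'N' ∨ c = 'S' ∨ c = 'E' ∨ c = 'W') :
    (l.foldl pvStepA (pos, acc)).2
    = acc ++ (pvAxis pvXStep pos.1 (l.map (fun step => (PySem.List.index? ['N','S','E','W'] step).getD 0))).zip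
              (pvAxis pvYStep pos.2 (l.map (fun step => (PySem.List.index? ['N','S','E','W'] step).getD 0))) := by
  induction l generalizing pos acc with
  | nil => simp [pvAxis]
  | cons c cs ih =>
    have hc := h c (by simp)
    have hcs : ∀ x ∈ cs, x = 'N' ∨ x = 'S' ∨ x = 'E' ∨ x = 'W' :=
      fun x hx => h x (by simp [hx])
    rcases hc with rfl | rfl | rfl | rfl <;>
      [rw [List.foldl_cons, pvStepA_N]; rw [List.foldl_cons, pvStepA_S];
       rw [List.foldl_cons, pvStepA_E]; rw [List.foldl_cons, pvStepA_W]] <;>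
      rw [ih _ _ hcs] <;>
      simp only [List.map_cons, pvIdxN, pvIdxS, pvIdxE, pvIdxW, Option.getD_some,
        Nat.cast_ofNat, Nat.cast_one, Nat.cast_zero, pvZipAxis_cons] <;>
      simp [pvXStep, pvYStep, sub_eq_add_neg]

-- ===== VERDICT (by name: the statement is the Claim_ definition above) =====
theorem get_path_coordinates_spec : Claim_equal_get_path_coordinates := by
  intro sp path _ hpre
  have h : ∀ c ∈ path.toList, c = 'N' ∨ c = 'S' ∨ c = 'E' ∨ c = 'W' := by
    intro c hc
    have := List.all_eq_true.mp hpre c hc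
    simp only [Bool.or_eq_true, beq_iff_eq] at this
    tauto
  unfold Spec_get_path_coordinates get_path_coordinates get_path_coordinates_alt pvIndices
  rw [pvFold_eq_zip path.toList sp [sp] h]
  simp [List.zip]
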